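-- pv_equiv track=rewrite | github.com/danielyouk/crypto-trading-rs | python/pairs_eda/correlation.py | _sectors_with_at_least_two_tickers
-- ===== SOURCE A (Python) =====
-- def _sectors_with_at_least_two_tickers(
--     tickers: list[str],
--     sector_map: dict[str, str],
-- ) -> set[str]:
--     """Sectors that have >= 2 panel tickers mapped (required for meaningful de-meaning)."""
--     from collections import Counter
--
--     counts: Counter[str] = Counter()
--     for t in tickers:
--         s = sector_map.get(t)
--         if s is not None:
--             counts[s] += 1
--     return {s for s, c in counts.items() if c >= 2}
-- ===== SOURCE B (Python) =====
-- def _sectors_with_at_least_two_tickers(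
--     tickers: list[str],
--     sector_map: dict[str, str],
-- ) -> set[str]:
--     """Sectors that have >= 2 panel tickers mapped (required for meaningful de-meaning)."""
--     sectors = [sector_map[t] for t in tickers if t in sector_map]
--     dups = []
--     while sectors:
--         s = sectors.pop(0)
--         if s in sectors:
--             dups.append(s)
--     return set(dups)
-- ===== Notes on version B (the rewrite author's own statement) =====
-- stated objective: alternative
-- what changed: B does no counting and keeps no per-sector state: it consumes the mapped-sector list head-first, emitting a sector exactly when another occurrence of it remains in the rest of the list (so each sector with >= 2 occurrences is emitted at every non-last occurrence and the set dedups), instead of tallying a Counter and filtering its items by count >= 2.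
import Mathlib
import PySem

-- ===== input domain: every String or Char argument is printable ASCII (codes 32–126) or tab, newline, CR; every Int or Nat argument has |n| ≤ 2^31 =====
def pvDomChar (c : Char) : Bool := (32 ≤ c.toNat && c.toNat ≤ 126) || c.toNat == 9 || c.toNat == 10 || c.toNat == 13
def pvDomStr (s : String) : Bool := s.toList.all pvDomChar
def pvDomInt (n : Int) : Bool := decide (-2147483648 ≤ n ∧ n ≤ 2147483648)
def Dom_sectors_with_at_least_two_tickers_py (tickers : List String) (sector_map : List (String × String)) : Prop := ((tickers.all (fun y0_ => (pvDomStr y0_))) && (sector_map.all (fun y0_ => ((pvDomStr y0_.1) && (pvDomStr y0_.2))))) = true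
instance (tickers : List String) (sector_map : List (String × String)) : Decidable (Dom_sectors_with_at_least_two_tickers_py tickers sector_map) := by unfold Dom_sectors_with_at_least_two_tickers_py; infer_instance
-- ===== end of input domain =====

-- B replaces A's Counter tally by a head-first scan that emits a sector whenever another occurrence remains in the rest of the list; the returned set is proved equal.

-- ===== PORT A =====
def sectors_with_at_least_two_tickers_py (tickers : List String) (sector_map : List (String × String)) : List String :=
  let sm : PySem.Dict String String := PySem.Dict.mk sector_map
  let counts : PySem.Dict String Int :=
    tickers.foldl (fun c t =>
      match sm.get? t with
      | none => c
      | some s => c.modify s 0 (· + 1)) PySem.Dict.empty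
  PySem.Set.ofList (((counts.items.filter (fun p => 2 ≤ p.2)).map (fun p => p.1)))

-- ===== PORT B =====
-- 'sm.getD t ""' ports 'sector_map[t]': exact because it is evaluated only under the 't in sector_map' filter.
-- The 'while sectors: s = sectors.pop(0); if s in sectors: dups.append(s)' loop is the structural recursion pvCollectDups.
def pvCollectDups : List String → List String
  | [] => []
  | s :: rest => if rest.contains s then s :: pvCollectDups rest else pvCollectDups rest

def sectors_with_at_least_two_tickers_py_alt (tickers : List String) (sector_map : List (String × String)) : List String :=
  let sm : PySem.Dict String String := PySem.Dict.mk sector_map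
  let sectors : List String := (tickers.filter (fun t => sm.contains t)).map (fun t => sm.getD t "")
  PySem.Set.ofList (pvCollectDups sectors)

-- ===== PRECONDITION & SPEC =====
def Spec_sectors_with_at_least_two_tickers_py (tickers : List String) (sector_map : List (String × String)) (out : List String) : Prop := out = sectors_with_at_least_two_tickers_py_alt tickers sector_map
instance (tickers : List String) (sector_map : List (String × String)) (out : List String) : Decidable (Spec_sectors_with_at_least_two_tickers_py tickers sector_map out) := by unfold Spec_sectors_with_at_least_two_tickers_py; infer_instance

-- ===== CLAIM (what is proved, stated in full; the proofs are below) =====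
def Claim_equal_sectors_with_at_least_two_tickers_py : Prop := ∀ (tickers : List String) (sector_map : List (String × String)), Dom_sectors_with_at_least_two_tickers_py tickers sector_map → Spec_sectors_with_at_least_two_tickers_py tickers sector_map (sectors_with_at_least_two_tickers_py tickers sector_map)

-- ===== LEMMAS AND PROOFS =====

-- A's tally loop over tickers is the Counter of the list of mapped sectors.
theorem pv_fold_eq_counter (sm : PySem.Dict String String) (tickers : List String) :
    ∀ d : PySem.Dict String Int,
      tickers.foldl (fun c t =>
        match sm.get? t with
        | none => c
        | some s => c.modify s 0 (· + 1)) d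
      = (tickers.filterMap (fun t => sm.get? t)).foldl (fun c s => c.modify s 0 (· + 1)) d := by
  induction tickers with
  | nil => intro d; rfl
  | cons t ts ih =>
    intro d
    cases h : sm.get? t with
    | none => simp [List.foldl_cons, h, ih]
    | some s => simp [List.foldl_cons, h, ih]

-- B's sectors list is the same list of mapped sectors.
theorem pv_sectors_eq (sm : PySem.Dict String String) (tickers : List String) :
    (tickers.filter (fun t => sm.contains t)).map (fun t => sm.getD t "")
      = tickers.filterMap (fun t => sm.get? t) := by
  induction tickers with
  | nil => rfl
  | cons t ts ih =>
    cases h : sm.get? t with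
    | none =>
      have hc : sm.contains t = false := by
        rw [PySem.Dict.contains_eq_isSome_get?, h]; rfl
      simp [h, hc, ih]
    | some s =>
      have hc : sm.contains t = true := by
        rw [PySem.Dict.contains_eq_isSome_get?, h]; rfl
      have hd : sm.getD t "" = s := by
        rw [PySem.Dict.getD_eq_get?_getD, h]; rfl
      simp [h, hc, hd, ih]

-- The set of B's emitted duplicates is A's filtered dedup list: the distinct sectors
-- occurring at least twice, in first-occurrence order.
theorem pv_set_collectDups (xs : List String) :
    PySem.Set.ofList (pvCollectDups xs)
      = (PySem.Set.ofList xs).filter (fun s => decide (2 ≤ xs.count s)) := by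
  induction xs with
  | nil => rfl
  | cons x rest ih =>
    rw [PySem.Set.ofList_cons]
    by_cases hx : x ∈ rest
    · have hcnt : (2 ≤ (x :: rest).count x) := by
        have := List.count_pos_iff.2 hx
        simp; omega
      rw [show pvCollectDups (x :: rest) = x :: pvCollectDups rest by simp [pvCollectDups, hx]]
      rw [PySem.Set.ofList_cons, ih]
      simp only [List.filter_cons, hcnt, decide_true]
      congr 1
      -- discard is a filter; the two filters commute, and counts agree off x
      simp only [PySem.Set.discard, List.filter_filter]
      apply List.filter_congr
      intro y _
      by_cases hyx : y = x
      · simp [hyx]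
      · have hxy : ¬ x = y := fun h => hyx h.symm
        have : (x :: rest).count y = rest.count y := by
          simp [hxy]
        simp [this, Bool.and_comm]
    · have hcnt : ¬ (2 ≤ (x :: rest).count x) := by
        have : rest.count x = 0 := List.count_eq_zero.2 hx
        simp [this]
      rw [show pvCollectDups (x :: rest) = pvCollectDups rest by simp [pvCollectDups, hx]]
      rw [ih]
      simp only [List.filter_cons, hcnt, decide_false]
      simp only [PySem.Set.discard, List.filter_filter]
      apply List.filter_congr
      intro y hy
      have hyr : y ∈ rest := (PySem.Set.mem_ofList _ _).1 hy
      have hyx : ¬ (y = x) := fun h => hx (h ▸ hyr)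
      have hxy : ¬ x = y := fun h => hyx h.symm
      have : (x :: rest).count y = rest.count y := by simp [hxy]
      simp [hyx, this]

-- ===== VERDICT (by name: the statement is the Claim_ definition above) =====
theorem sectors_with_at_least_two_tickers_py_spec : Claim_equal_sectors_with_at_least_two_tickers_py := by
  intro tickers sector_map _
  unfold Spec_sectors_with_at_least_two_tickers_py
  unfold sectors_with_at_least_two_tickers_py sectors_with_at_least_two_tickers_py_alt
  simp only []
  set sm : PySem.Dict String String := PySem.Dict.mk sector_map with hsm
  set xs : List String := tickers.filterMap (fun t => sm.get? t) with hxs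
  rw [pv_fold_eq_counter, pv_sectors_eq, ← hxs]
  rw [pv_set_collectDups]
  rw [← PySem.Dict.counter_eq_foldl, PySem.Dict.items_counter]
  rw [List.filter_map, List.map_map]
  simp only [Function.comp_def, List.map_id']
  have h1 : ((PySem.Set.ofList xs).filter fun k => decide ((2:Int) ≤ (xs.count k : Int)))
      = ((PySem.Set.ofList xs).filter fun k => decide (2 ≤ xs.count k)) := by
    apply List.filter_congr; intro y _; simp
  rw [h1]
  exact (PySem.Set.ofList_eq_self_of_nodup _ (List.Nodup.filter _ (PySem.Set.nodup_ofList xs)))
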